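-- pv_equiv track=rewrite | github.com/SETI/pds-migration | metadata/index_support.py | _parse_columns
-- ===== SOURCE A (Python) =====
-- def _parse_block(lines, head=0,
--                  start_token='OBJECT=COLUMN', end_token='END_OBJECT=COLUMN'):
--     """Extract a block of lines between two tokens.
--
--     Inputs:
--         lines         list of strings.
--         head          line at which to start search.
--         start_token   string giving token that starts a block.
--         end_token     string giving token that ends a block.
--
--     Outputs:
--         block         list of strings inthe first detected block.
--         head          line number of the start of the block.
--         tail          line number of the end of the block.
--     """
--
--     tail = -1
--     block = []
--     for i in range(head,len(lines)):
--         line = lines[i]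
--         if line.replace(' ', '').startswith(start_token):
--             head = i
--             tail = head
--             for line in lines[i:]:
--                 tail += 1
--                 block.append(line)
--                 if line.replace(' ', '').startswith(end_token):
--                     break
--             if block:
--                 break
--
--     return (block, head, tail)
--
-- def _parse_column(lines):
--     """Parse a column description into a dictionary.
--
--     Inputs:
--         lines         list of strings giving the column description.
--
--     Outputs:          column dictionary.
--     """
--
--     column_desc = {}
--     for line in lines:
--         line = line.replace(' ', '')
--         kv = line.split('=')
--         column_desc[kv[0]] = kv[1].strip()
--     return column_desc
--
-- def _parse_columns(lines):
--     """Parse all column descriptions into a list of dictionaries.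
--
--     Inputs:
--         lines         list of strings containing the PDS label.
--
--     Outputs:          list of column dictionaries.
--     """
--
--     column_dicts = []
--     head = 0
--     while(True):
--
--         # Get the current block
--         block, head, tail = _parse_block(lines, head)
--         if block == []:
--             break
--
--         # Append the column dictionary
--         column_dicts.append(_parse_column(block))
--
--         # Advance the read head
--         head += len(block)
--
--     return column_dicts
-- ===== SOURCE B (Python) =====
-- def _parse_columns(lines):
--     """Parse all column descriptions into a list of dictionaries.
--
--     Single linear state machine over the lines: open a dict at an
--     OBJECT=COLUMN line, fill it line by line, close it at the
--     END_OBJECT=COLUMN line (a trailing unterminated block is still kept).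
--     """
--     column_dicts = []
--     current = None
--     for line in lines:
--         stripped = line.replace(' ', '')
--         if current is None:
--             if stripped.startswith('OBJECT=COLUMN'):
--                 kv = stripped.split('=')
--                 current = {kv[0]: kv[1].strip()}
--         else:
--             kv = stripped.split('=')
--             current[kv[0]] = kv[1].strip()
--             if stripped.startswith('END_OBJECT=COLUMN'):
--                 column_dicts.append(current)
--                 current = None
--     if current is not None:
--         column_dicts.append(current)
--     return column_dicts
-- ===== Notes on version B (the rewrite author's own statement) =====
-- stated objective: simpler
-- what changed: Replaced A's repeated two-phase block extraction (_parse_block rescanning from a moving head, then _parse_column re-walking each extracted block) by a single linear state machine over the lines with an in-block current dict, so the intermediate block lists and head/tail index bookkeeping disappear.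
import Mathlib
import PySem

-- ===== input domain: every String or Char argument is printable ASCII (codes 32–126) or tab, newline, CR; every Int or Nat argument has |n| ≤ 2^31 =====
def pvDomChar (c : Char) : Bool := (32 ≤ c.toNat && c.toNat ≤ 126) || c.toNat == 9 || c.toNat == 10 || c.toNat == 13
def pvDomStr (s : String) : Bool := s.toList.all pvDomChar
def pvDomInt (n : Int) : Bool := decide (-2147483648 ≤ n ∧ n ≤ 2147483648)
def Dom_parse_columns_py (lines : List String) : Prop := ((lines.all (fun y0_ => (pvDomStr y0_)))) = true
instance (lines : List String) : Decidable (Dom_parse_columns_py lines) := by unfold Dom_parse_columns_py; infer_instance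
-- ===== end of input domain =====

-- B replaces A's repeated two-phase block extraction with one linear state machine; objective: simpler.

-- helpers shared by both ports (the very same Python lines occur in A and in B):
-- line.replace(' ', '')
def pvStripSp (s : String) : String := PySem.Str.replace s " " ""
-- stripped.startswith('OBJECT=COLUMN') / ('END_OBJECT=COLUMN')
def pvIsStart (s : String) : Bool := PySem.Str.startswith (pvStripSp s) "OBJECT=COLUMN"
def pvIsEnd (s : String) : Bool := PySem.Str.startswith (pvStripSp s) "END_OBJECT=COLUMN"
-- kv = stripped.split('='); d[kv[0]] = kv[1].strip()   (the no-'=' case is an IndexError in Python: outside Pre_)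
def pvKvStep (d : PySem.Dict String String) (line : String) : PySem.Dict String String :=
  match PySem.Str.split? (pvStripSp line) "=" with
  | some (k :: v :: _) => d.insert k (PySem.Str.strip v)
  | _ => d

-- ===== PORT A =====
-- inner loop of _parse_block: for line in lines[i:]: tail += 1; block.append(line); if end: break
def pvBlockInner : List String → Int → List String → (List String × Int)
  | [], tail, block => (block, tail)
  | l :: rest, tail, block =>
      let block' := block ++ [l]
      if pvIsEnd l then (block', tail + 1) else pvBlockInner rest (tail + 1) block'

-- outer loop of _parse_block: for i in range(head, len(lines)); suffix = lines[i:], i tracked alongside.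
-- head is a Nat: every call from _parse_columns passes a nonnegative index.
def pvBlockOuter : List String → Nat → Nat → Int → (List String × Nat × Int)
  | [], _i, head, tail => ([], head, tail)
  | l :: rest, i, head, tail =>
      if pvIsStart l then
        let bt := pvBlockInner (l :: rest) (Int.ofNat i) []
        if bt.1 ≠ [] then (bt.1, i, bt.2) else pvBlockOuter rest (i + 1) i bt.2
      else pvBlockOuter rest (i + 1) head tail

def pvParseBlock (lines : List String) (head : Nat) : List String × Nat × Int :=
  pvBlockOuter (lines.drop head) head head (-1)

-- _parse_column
def pvParseColumn (block : List String) : PySem.Dict String String :=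
  block.foldl pvKvStep PySem.Dict.empty

-- while(True) loop of _parse_columns; fuel lines.length+1 suffices since head strictly increases
def pvColsLoop (lines : List String) : Nat → Nat → List (PySem.Dict String String) → List (PySem.Dict String String)
  | 0, _, acc => acc
  | fuel + 1, head, acc =>
      if (pvParseBlock lines head).1 = [] then acc
      else pvColsLoop lines fuel ((pvParseBlock lines head).2.1 + (pvParseBlock lines head).1.length)
             (acc ++ [pvParseColumn (pvParseBlock lines head).1])

def parse_columns_py (lines : List String) : List (List (String × String)) :=
  (pvColsLoop lines (lines.length + 1) 0 []).map PySem.Dict.items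

-- ===== PORT B =====
-- single state machine: current = none (outside a block) | some d (inside, dict so far)
def pvAltLoop : List String → Option (PySem.Dict String String) → List (PySem.Dict String String) → List (PySem.Dict String String)
  | [], none, acc => acc
  | [], some d, acc => acc ++ [d]
  | l :: rest, none, acc =>
      if pvIsStart l then pvAltLoop rest (some (pvKvStep PySem.Dict.empty l)) acc
      else pvAltLoop rest none acc
  | l :: rest, some d, acc =>
      let d' := pvKvStep d l
      if pvIsEnd l then pvAltLoop rest none (acc ++ [d'])
      else pvAltLoop rest (some d') acc

def parse_columns_py_alt (lines : List String) : List (List (String × String)) :=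
  (pvAltLoop lines none []).map PySem.Dict.items

-- ===== PRECONDITION & SPEC =====
-- A (and B) raise IndexError when a line lying inside a COLUMN block (after its OBJECT=COLUMN
-- opener, up to and including its END_OBJECT=COLUMN line or the end of input) contains no '=';
-- Pre_ excludes exactly those inputs via a simple in/out flag scan over the lines.
def pvPreOk : List String → Bool → Bool
  | [], _ => true
  | l :: rest, false => pvPreOk rest (pvIsStart l)
  | l :: rest, true => PySem.Str.isIn "=" l && pvPreOk rest (!pvIsEnd l)

def Pre_parse_columns_py (lines : List String) : Prop := pvPreOk lines false = true
instance (lines : List String) : Decidable (Pre_parse_columns_py lines) := by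
  unfold Pre_parse_columns_py; infer_instance

def pvWitness_parse_columns_py : List String :=
  ["OBJECT = COLUMN", "NAME = FOO", "END_OBJECT = COLUMN", "junk", "OBJECT=COLUMN", "BYTES=4"]

def Spec_parse_columns_py (lines : List String) (out : List (List (String × String))) : Prop := out = parse_columns_py_alt lines
instance (lines : List String) (out : List (List (String × String))) : Decidable (Spec_parse_columns_py lines out) := by unfold Spec_parse_columns_py; infer_instance

-- ===== CLAIM (what is proved, stated in full; the proofs are below) =====
def Claim_equal_parse_columns_py : Prop := ∀ (lines : List String), Dom_parse_columns_py lines → Pre_parse_columns_py lines → Spec_parse_columns_py lines (parse_columns_py lines)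

-- ===== LEMMAS AND PROOFS =====

-- the block A's inner loop extracts from a suffix: lines up to and including the first end token
def pvTake : List String → List String
  | [] => []
  | l :: r => if pvIsEnd l then [l] else l :: pvTake r

-- index of the first start-token line in a suffix
def pvFindStart : List String → Option Nat
  | [] => none
  | l :: r => if pvIsStart l then some 0 else (pvFindStart r).map (· + 1)

theorem pvNotEnd_of_start (s : String) (h : pvIsStart s = true) : pvIsEnd s = false := by
  unfold pvIsStart at h
  unfold pvIsEnd
  by_contra hc
  rw [Bool.not_eq_false] at hc
  rw [PySem.Str.startswith_eq, PySem.Chars.startswith_iff] at h hc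
  have := List.prefix_of_prefix_length_le h hc (by decide)
  revert this; decide

theorem pvBlockInner_fst (rest : List String) : ∀ tail block,
    (pvBlockInner rest tail block).1 = block ++ pvTake rest := by
  induction rest with
  | nil => intro tail block; simp [pvBlockInner, pvTake]
  | cons l r ih =>
      intro tail block
      simp only [pvBlockInner, pvTake]
      by_cases h : pvIsEnd l = true
      · simp [h]
      · simp only [Bool.not_eq_true] at h
        simp [h, ih]

theorem pvTake_ne_nil (l : String) (r : List String) : pvTake (l :: r) ≠ [] := by
  unfold pvTake; split <;> simp

theorem pvTake_length_le (s : List String) : (pvTake s).length ≤ s.length := by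
  induction s with
  | nil => simp [pvTake]
  | cons l r ih =>
      unfold pvTake; split <;> simp <;> omega

theorem pvBlockOuter_none (s : List String) (hn : pvFindStart s = none) :
    ∀ i head tail, (pvBlockOuter s i head tail).1 = [] := by
  induction s with
  | nil => intro i head tail; simp [pvBlockOuter]
  | cons l r ih =>
      intro i head tail
      by_cases h : pvIsStart l = true
      · simp [pvFindStart, h] at hn
      · simp only [Bool.not_eq_true] at h
        simp [pvFindStart, h] at hn
        simp [pvBlockOuter, h, ih hn]

theorem pvBlockOuter_some (s : List String) : ∀ j, pvFindStart s = some j →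
    ∀ i head tail, (pvBlockOuter s i head tail).1 = pvTake (s.drop j) ∧
      (pvBlockOuter s i head tail).2.1 = i + j := by
  induction s with
  | nil => intro j hj; simp [pvFindStart] at hj
  | cons l r ih =>
      intro j hj i head tail
      by_cases h : pvIsStart l = true
      · simp [pvFindStart, h] at hj
        subst hj
        have hne : pvTake (l :: r) ≠ [] := pvTake_ne_nil l r
        simp [pvBlockOuter, h, pvBlockInner_fst, hne]
      · simp only [Bool.not_eq_true] at h
        simp only [pvFindStart, h, Bool.false_eq_true, if_false, Option.map_eq_some_iff] at hj
        obtain ⟨j', hj', rfl⟩ := hj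
        have := ih j' hj' (i + 1) head tail
        constructor
        · simpa [pvBlockOuter, h] using this.1
        · have h2 := this.2
          simp only [pvBlockOuter, h, Bool.false_eq_true, if_false] at h2 ⊢
          omega

theorem pvFindStart_some_lt (s : List String) : ∀ j, pvFindStart s = some j → j < s.length := by
  induction s with
  | nil => intro j hj; simp [pvFindStart] at hj
  | cons l r ih =>
      intro j hj
      by_cases h : pvIsStart l = true
      · simp [pvFindStart, h] at hj; subst hj; simp
      · simp only [Bool.not_eq_true] at h
        simp only [pvFindStart, h, Bool.false_eq_true, if_false, Option.map_eq_some_iff] at hj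
        obtain ⟨j', hj', rfl⟩ := hj
        have := ih j' hj'
        simp only [List.length_cons]; omega

theorem pvFindStart_some_start (s : List String) : ∀ j, pvFindStart s = some j →
    ∃ l r, s.drop j = l :: r ∧ pvIsStart l = true := by
  induction s with
  | nil => intro j hj; simp [pvFindStart] at hj
  | cons l r ih =>
      intro j hj
      by_cases h : pvIsStart l = true
      · simp [pvFindStart, h] at hj; subst hj; exact ⟨l, r, rfl, h⟩
      · simp only [Bool.not_eq_true] at h
        simp only [pvFindStart, h, Bool.false_eq_true, if_false, Option.map_eq_some_iff] at hj
        obtain ⟨j', hj', rfl⟩ := hj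
        simpa using ih j' hj'

theorem pvAltLoop_none (s : List String) (hn : pvFindStart s = none) :
    ∀ acc, pvAltLoop s none acc = acc := by
  induction s with
  | nil => intro acc; simp [pvAltLoop]
  | cons l r ih =>
      intro acc
      by_cases h : pvIsStart l = true
      · simp [pvFindStart, h] at hn
      · simp only [Bool.not_eq_true] at h
        simp [pvFindStart, h] at hn
        simp [pvAltLoop, h, ih hn]

theorem pvAltLoop_skip (s : List String) : ∀ j, pvFindStart s = some j →
    ∀ acc, pvAltLoop s none acc = pvAltLoop (s.drop j) none acc := by
  induction s with
  | nil => intro j hj; simp [pvFindStart] at hj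
  | cons l r ih =>
      intro j hj acc
      by_cases h : pvIsStart l = true
      · simp [pvFindStart, h] at hj; subst hj; simp
      · simp only [Bool.not_eq_true] at h
        simp only [pvFindStart, h, Bool.false_eq_true, if_false, Option.map_eq_some_iff] at hj
        obtain ⟨j', hj', rfl⟩ := hj
        simp [pvAltLoop, h, ih j' hj']

theorem pvAltLoop_block (r : List String) : ∀ d acc,
    pvAltLoop r (some d) acc =
      pvAltLoop (r.drop (pvTake r).length) none (acc ++ [(pvTake r).foldl pvKvStep d]) := by
  induction r with
  | nil => intro d acc; simp [pvAltLoop, pvTake]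
  | cons l r ih =>
      intro d acc
      by_cases h : pvIsEnd l = true
      · simp [pvAltLoop, pvTake, h]
      · simp only [Bool.not_eq_true] at h
        simp only [pvAltLoop, pvTake, h, Bool.false_eq_true, if_false]
        rw [ih]
        have : (l :: pvTake r).length = (pvTake r).length + 1 := by simp
        simp [this, List.foldl_cons]

theorem pvMain (fuel : Nat) : ∀ (lines : List String) (head : Nat) (acc : List (PySem.Dict String String)),
    lines.length - head < fuel →
    pvColsLoop lines fuel head acc = pvAltLoop (lines.drop head) none acc := by
  induction fuel with
  | zero => intro lines head acc h; omega
  | succ fuel ih =>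
      intro lines head acc hfuel
      unfold pvColsLoop pvParseBlock
      cases hf : pvFindStart (lines.drop head) with
      | none =>
          rw [pvBlockOuter_none _ hf]
          simp [pvAltLoop_none _ hf]
      | some j =>
          have hout := pvBlockOuter_some _ j hf head head (-1)
          have hlt := pvFindStart_some_lt _ j hf
          obtain ⟨l, r, hdrop, hstart⟩ := pvFindStart_some_start _ j hf
          have hend := pvNotEnd_of_start l hstart
          have htl : pvTake (l :: r) = l :: pvTake r := by
            simp only [pvTake, hend, Bool.false_eq_true, if_false]
          have hdl : (List.drop head lines).length = lines.length - head := by simp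
          have htlen : (pvTake r).length ≤ r.length := pvTake_length_le r
          have hrlen : (l :: r).length = (List.drop head lines).length - j := by
            rw [← hdrop]; simp; omega
          have hd2 : List.drop (head + j) lines = l :: r := by
            rw [← hdrop, List.drop_drop]
          -- reduce A's side to one recursive call
          simp only [hout.1, hout.2, hdrop, htl]
          rw [if_neg (by simp : (l :: pvTake r) ≠ [])]
          -- reduce B's side through the skipped prefix and the block
          rw [pvAltLoop_skip _ j hf, hdrop]
          simp only [pvAltLoop, hstart, if_true]
          rw [pvAltLoop_block]
          have hfb : lines.length - (head + j + (l :: pvTake r).length) < fuel := by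
            simp only [List.length_cons] at hrlen ⊢
            omega
          rw [ih lines _ _ hfb]
          have e1 : head + j + (l :: pvTake r).length = (head + j) + ((pvTake r).length + 1) := by
            simp only [List.length_cons]; try omega
          have hsuf : List.drop (head + j + (l :: pvTake r).length) lines = List.drop (pvTake r).length r := by
            rw [e1, ← List.drop_drop, hd2]
            simp
          rw [hsuf]
          have hcol : pvParseColumn (l :: pvTake r) = List.foldl pvKvStep (pvKvStep PySem.Dict.empty l) (pvTake r) := by
            simp [pvParseColumn]
          rw [hcol]

theorem parse_columns_py_spec : Claim_equal_parse_columns_py := by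
  intro lines _hdom _hpre
  unfold Spec_parse_columns_py parse_columns_py parse_columns_py_alt
  rw [pvMain (lines.length + 1) lines 0 [] (by omega)]
  simp
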